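-- pv_equiv track=rewrite | github.com/weichert/squadvault | scripts/_patch_prove_ci_wire_contract_surface_completeness_v2.py | find_anchor_index
-- ===== SOURCE A (Python) =====
-- def refuse(msg: str) -> None:
--   raise SystemExit(f"ERROR: {msg}")
--
-- def find_anchor_index(lines: list[str]) -> int:
--   """
--   Deterministic anchor selection, in priority order:
--   1) First line containing 'gate_contract_linkage_v1.sh'
--   2) First line containing 'contracts_index' (discoverability / linkage cluster)
--   3) First line containing 'gate_contracts' and '.sh'
--   4) Line that starts the unit tests block: insert immediately before it.
--   Refuse if none found.
--   """
--   # 1) direct linkage gate mention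
--   idxs = [i for i, ln in enumerate(lines) if "gate_contract_linkage_v1.sh" in ln]
--   if len(idxs) > 1:
--     refuse("multiple 'gate_contract_linkage_v1.sh' occurrences; ambiguous anchor")
--   if len(idxs) == 1:
--     return idxs[0] + 1
--
--   # 2) contract index / discoverability mention
--   idxs = [i for i, ln in enumerate(lines) if "contracts_index" in ln and ".sh" in ln]
--   if len(idxs) > 1:
--     refuse("multiple 'contracts_index' script occurrences; ambiguous anchor")
--   if len(idxs) == 1:
--     return idxs[0] + 1
--
--   # 3) any gate_contracts*.sh
--   idxs = [i for i, ln in enumerate(lines) if "gate_contract" in ln and ".sh" in ln]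
--   if len(idxs) > 1:
--     # deterministic choice: insert after the *last* contract-related gate line
--     return idxs[-1] + 1
--   if len(idxs) == 1:
--     return idxs[0] + 1
--
--   # 4) before unit tests header (stable section boundary)
--   idxs = [i for i, ln in enumerate(lines) if "==> unit tests" in ln]
--   if len(idxs) > 1:
--     refuse("multiple unit test section markers; unexpected prove_ci shape")
--   if len(idxs) == 1:
--     return idxs[0]
--
--   refuse("could not find any deterministic insertion anchor in scripts/prove_ci.sh")
--   return -1
-- ===== SOURCE B (Python) =====
-- def refuse(msg: str) -> None:
--   raise SystemExit(f"ERROR: {msg}")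
--
-- _PREDS = (
--   lambda ln: "gate_contract_linkage_v1.sh" in ln,
--   lambda ln: "contracts_index" in ln and ".sh" in ln,
--   lambda ln: "gate_contract" in ln and ".sh" in ln,
--   lambda ln: "==> unit tests" in ln,
-- )
--
-- def find_anchor_index(lines: list[str]) -> int:
--   # Phase 1: one fold keeping only O(1) scalar summaries per rule:
--   # (count, first index, last index) -- no index lists are ever built.
--   st = [(0, 0, 0)] * 4
--   for i, ln in enumerate(lines):
--     for k, p in enumerate(_PREDS):
--       if p(ln):
--         c, f, l = st[k]
--         st[k] = (c + 1, f if c else i, i)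
--
--   # Phase 2: generic table-driven decision loop. Each rule contributes
--   # (count, candidate answer, strict?): strict rules refuse on ambiguity,
--   # the non-strict rule (gate_contract*.sh) answers last+1 regardless
--   # (for a unique match first == last, so last+1 is first+1 as well).
--   table = (
--     (st[0][0], st[0][1] + 1, True),
--     (st[1][0], st[1][1] + 1, True),
--     (st[2][0], st[2][2] + 1, False),
--     (st[3][0], st[3][1], True),
--   )
--   for count, cand, strict in table:
--     if count > 1 and strict:
--       refuse("ambiguous anchor")
--     if count >= 1:
--       return cand
--   refuse("could not find any deterministic insertion anchor in scripts/prove_ci.sh")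
-- ===== Notes on version B (the rewrite author's own statement) =====
-- stated objective: alternative
-- what changed: B never builds index lists: one fold keeps only scalar (count, first, last) summaries per rule, and the hand-written four-branch cascade is replaced by a generic table-driven decision loop over (count, candidate, strict) rule descriptors, with rule 3's two cases collapsed into a single last+1 candidate.
import Mathlib
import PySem

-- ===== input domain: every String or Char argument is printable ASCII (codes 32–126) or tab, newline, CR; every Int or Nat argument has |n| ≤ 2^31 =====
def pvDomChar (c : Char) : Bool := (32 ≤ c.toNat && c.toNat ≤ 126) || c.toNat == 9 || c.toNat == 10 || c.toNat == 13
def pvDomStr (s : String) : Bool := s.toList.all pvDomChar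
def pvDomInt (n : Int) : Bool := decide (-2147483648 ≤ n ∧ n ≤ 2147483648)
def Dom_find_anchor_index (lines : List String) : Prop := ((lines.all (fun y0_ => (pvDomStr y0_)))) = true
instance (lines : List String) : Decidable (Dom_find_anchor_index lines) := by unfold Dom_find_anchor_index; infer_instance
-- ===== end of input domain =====

-- B keeps only scalar (count, first, last) summaries per rule in one fold (no index lists)
-- and decides via a generic table-driven loop over (count, candidate, strict) descriptors;
-- objective: alternative. A raises SystemExit ('refuse') on ambiguous / anchor-free inputs;
-- those are outside Pre_ and both ports return -1 there.

-- shared anchor predicates (the four substring tests of the Python source)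
def anchP1 (ln : String) : Bool := PySem.Str.isIn "gate_contract_linkage_v1.sh" ln
def anchP2 (ln : String) : Bool := PySem.Str.isIn "contracts_index" ln && PySem.Str.isIn ".sh" ln
def anchP3 (ln : String) : Bool := PySem.Str.isIn "gate_contract" ln && PySem.Str.isIn ".sh" ln
def anchP4 (ln : String) : Bool := PySem.Str.isIn "==> unit tests" ln

-- ===== PORT A =====
-- four successive comprehensions over enumerate(lines); refuse (SystemExit) ported as -1 (outside Pre_)
def find_anchor_index (lines : List String) : Int :=
  let e := PySem.List.enumerate lines
  let idxs1 := (e.filter (fun p => anchP1 p.2)).map Prod.fst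
  if idxs1.length > 1 then -1
  else if idxs1.length = 1 then idxs1.headD 0 + 1
  else
    let idxs2 := (e.filter (fun p => anchP2 p.2)).map Prod.fst
    if idxs2.length > 1 then -1
    else if idxs2.length = 1 then idxs2.headD 0 + 1
    else
      let idxs3 := (e.filter (fun p => anchP3 p.2)).map Prod.fst
      if idxs3.length > 1 then idxs3.getLastD 0 + 1
      else if idxs3.length = 1 then idxs3.headD 0 + 1
      else
        let idxs4 := (e.filter (fun p => anchP4 p.2)).map Prod.fst
        if idxs4.length > 1 then -1
        else if idxs4.length = 1 then idxs4.headD 0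
        else -1

-- ===== PORT B =====
-- per-rule scalar summary (count, first, last), updated on a matching line
def anchUpd (p : String → Bool) (t : Int × Int × Int) (q : Int × String) : Int × Int × Int :=
  if p q.2 then (t.1 + 1, if t.1 = 0 then q.1 else t.2.1, q.1) else t

-- phase 1: one fold updating the four scalar summaries
def anchScanStep (st : (Int × Int × Int) × (Int × Int × Int) × (Int × Int × Int) × (Int × Int × Int))
    (q : Int × String) :
    (Int × Int × Int) × (Int × Int × Int) × (Int × Int × Int) × (Int × Int × Int) :=
  (anchUpd anchP1 st.1 q, anchUpd anchP2 st.2.1 q, anchUpd anchP3 st.2.2.1 q, anchUpd anchP4 st.2.2.2 q)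

def anchScan (lines : List String) :
    (Int × Int × Int) × (Int × Int × Int) × (Int × Int × Int) × (Int × Int × Int) :=
  (PySem.List.enumerate lines).foldl anchScanStep ((0,0,0), (0,0,0), (0,0,0), (0,0,0))

-- phase 2: generic decision loop over (count, candidate, strict) descriptors
def anchChoose : List (Int × Int × Bool) → Int
  | [] => -1
  | (c, v, strict) :: rest =>
    if 1 < c then (if strict then -1 else v)
    else if c = 1 then v
    else anchChoose rest

def find_anchor_index_alt (lines : List String) : Int :=
  let st := anchScan lines
  anchChoose
    [(st.1.1, st.1.2.1 + 1, true),
     (st.2.1.1, st.2.1.2.1 + 1, true),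
     (st.2.2.1.1, st.2.2.1.2.2 + 1, false),
     (st.2.2.2.1, st.2.2.2.2.1, true)]

-- ===== PRECONDITION & SPEC =====
-- Pre_ excludes exactly the inputs on which A's 'refuse' raises SystemExit: an ambiguous
-- anchor (two rule-1, rule-2 or rule-4 matches where that rule decides) or no anchor at all.
def Pre_find_anchor_index (lines : List String) : Prop :=
  lines.countP anchP1 = 1 ∨
  (lines.countP anchP1 = 0 ∧ (lines.countP anchP2 = 1 ∨
    (lines.countP anchP2 = 0 ∧ (1 ≤ lines.countP anchP3 ∨
      (lines.countP anchP3 = 0 ∧ lines.countP anchP4 = 1)))))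
instance (lines : List String) : Decidable (Pre_find_anchor_index lines) := by
  unfold Pre_find_anchor_index; infer_instance

def pvWitness_find_anchor_index : List String := ["run gate_contract_linkage_v1.sh"]

def Spec_find_anchor_index (lines : List String) (out : Int) : Prop := out = find_anchor_index_alt lines
instance (lines : List String) (out : Int) : Decidable (Spec_find_anchor_index lines out) := by unfold Spec_find_anchor_index; infer_instance

-- ===== CLAIM (what is proved, stated in full; the proofs are below) =====
def Claim_equal_find_anchor_index : Prop := ∀ (lines : List String), Dom_find_anchor_index lines → Pre_find_anchor_index lines → Spec_find_anchor_index lines (find_anchor_index lines)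

-- ===== LEMMAS AND PROOFS =====

-- the componentwise fold splits into four independent folds
theorem anchScan_foldl_split (e : List (Int × String))
    (a b c d : Int × Int × Int) :
    e.foldl anchScanStep (a, b, c, d) =
      (e.foldl (anchUpd anchP1) a, e.foldl (anchUpd anchP2) b,
       e.foldl (anchUpd anchP3) c, e.foldl (anchUpd anchP4) d) := by
  induction e generalizing a b c d with
  | nil => rfl
  | cons q e ih => simp [List.foldl_cons, anchScanStep, ih]

-- a single scalar fold computes (count, first, last) of the filtered index list
theorem anchUpd_foldl (p : String → Bool) (e : List (Int × String)) (t : Int × Int × Int)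
    (h : 0 ≤ t.1) :
    e.foldl (anchUpd p) t =
      (t.1 + ((e.filter (fun q => p q.2)).length : Int),
       if t.1 = 0 then ((e.filter (fun q => p q.2)).map Prod.fst).headD t.2.1 else t.2.1,
       ((e.filter (fun q => p q.2)).map Prod.fst).getLastD t.2.2) := by
  induction e generalizing t with
  | nil => simp
  | cons q e ih =>
    by_cases hp : p q.2
    · rw [List.foldl_cons]
      rw [show anchUpd p t q = (t.1 + 1, if t.1 = 0 then q.1 else t.2.1, q.1) by
        simp [anchUpd, hp]]
      rw [ih _ (by omega)]
      have hne : ¬ (t.1 + 1 = 0) := by omega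
      simp only [List.filter_cons, hp, if_pos, List.map_cons, List.length_cons, hne, if_false,
        List.getLastD_cons, Prod.mk.injEq]
      refine ⟨by push_cast; omega, ?_, trivial⟩
      by_cases ht : t.1 = 0 <;> simp [ht]
    · rw [List.foldl_cons]
      rw [show anchUpd p t q = t by simp [anchUpd, hp]]
      rw [ih _ h]
      simp [hp]

theorem anchScan_eq (lines : List String) :
    anchScan lines =
      (let e := PySem.List.enumerate lines
       let F := fun (p : String → Bool) =>
         ((((e.filter (fun q => p q.2)).length : Int)),
          ((e.filter (fun q => p q.2)).map Prod.fst).headD 0,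
          ((e.filter (fun q => p q.2)).map Prod.fst).getLastD 0)
       (F anchP1, F anchP2, F anchP3, F anchP4)) := by
  unfold anchScan
  rw [anchScan_foldl_split]
  rw [anchUpd_foldl _ _ _ (by norm_num), anchUpd_foldl _ _ _ (by norm_num),
      anchUpd_foldl _ _ _ (by norm_num), anchUpd_foldl _ _ _ (by norm_num)]
  simp

-- unconditional agreement of the two ports (refuse cases both yield -1)
theorem find_anchor_index_eq_alt (lines : List String) :
    find_anchor_index lines = find_anchor_index_alt lines := by
  unfold find_anchor_index find_anchor_index_alt
  rw [anchScan_eq]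
  simp only []
  rcases h1 : ((PySem.List.enumerate lines).filter (fun p => anchP1 p.2)).map Prod.fst with
    _ | ⟨i, _ | ⟨j, t⟩⟩ <;>
  rcases h2 : ((PySem.List.enumerate lines).filter (fun p => anchP2 p.2)).map Prod.fst with
    _ | ⟨i2, _ | ⟨j2, t2⟩⟩ <;>
  rcases h3 : ((PySem.List.enumerate lines).filter (fun p => anchP3 p.2)).map Prod.fst with
    _ | ⟨i3, _ | ⟨j3, t3⟩⟩ <;>
  rcases h4 : ((PySem.List.enumerate lines).filter (fun p => anchP4 p.2)).map Prod.fst with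
    _ | ⟨i4, _ | ⟨j4, t4⟩⟩ <;>
  · have l1 := congrArg List.length h1
    have l2 := congrArg List.length h2
    have l3 := congrArg List.length h3
    have l4 := congrArg List.length h4
    simp only [List.length_map] at l1 l2 l3 l4
    simp [anchChoose, h1, h2, h3, h4, l1, l2, l3, l4]

-- ===== VERDICT (by name: the statement is the Claim_ definition above) =====
theorem find_anchor_index_spec : Claim_equal_find_anchor_index := by
  intro lines _ _
  unfold Spec_find_anchor_index
  exact find_anchor_index_eq_alt lines
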